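-- pv_equiv track=rewrite | github.com/Meenakshimkumar/DEFENDER-WEBSITE | backend/app.py | determine_deterrent
-- ===== SOURCE A (Python) =====
-- def determine_deterrent(animal, severity):
--     if not animal:
--         return "None"
--
--     animal_lower = str(animal).lower().strip()
--
--     if 'elephant' in animal_lower:
--         return "Bee Sound & Flashlight Strobe"
--     elif any(predator in animal_lower for predator in ['bear', 'lion', 'tiger', 'wolf', 'panther', 'leopard']):
--         return "High-Intensity Siren & Flashlight"
--     elif any(mid_threat in animal_lower for mid_threat in ['boar', 'deer', 'moose', 'buffalo', 'rhino', 'zebra']):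
--         return "Ultrasonic Sound & Flashlight"
--     elif any(small_threat in animal_lower for small_threat in ['dog', 'fox', 'coyote', 'cat', 'raccoon', 'possum', 'skunk']):
--         return "Ultrasonic Sound"
--     elif any(bird in animal_lower for bird in ['bird', 'pigeon', 'crow', 'owl', 'hawk', 'eagle']):
--         return "High-Pitch Ultrasonic"
--     elif 'human' in animal_lower or 'person' in animal_lower:
--         return "None" # Let pass silently due to low severity categorization
--
--     # Fallback based on severity if animal type isn't specifically mapped
--     if severity == 'high':
--         return "Siren & Flashlight"
--     elif severity == 'medium':
--         return "Ultrasonic Sound"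
--     else:
--         return "None"
-- ===== SOURCE B (Python) =====
-- # Single scan of the animal string: at each position, look up which keyword starts
-- # there and keep the MINIMUM priority seen; priorities encode A's elif precedence.
-- _KEYWORDS = {
--     'elephant': 0,
--     'bear': 1, 'lion': 1, 'tiger': 1, 'wolf': 1, 'panther': 1, 'leopard': 1,
--     'boar': 2, 'deer': 2, 'moose': 2, 'buffalo': 2, 'rhino': 2, 'zebra': 2,
--     'dog': 3, 'fox': 3, 'coyote': 3, 'cat': 3, 'raccoon': 3, 'possum': 3, 'skunk': 3,
--     'bird': 4, 'pigeon': 4, 'crow': 4, 'owl': 4, 'hawk': 4, 'eagle': 4,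
--     'human': 5, 'person': 5,
-- }
-- _RESPONSES = ["Bee Sound & Flashlight Strobe", "High-Intensity Siren & Flashlight",
--               "Ultrasonic Sound & Flashlight", "Ultrasonic Sound",
--               "High-Pitch Ultrasonic", "None"]
--
--
-- def determine_deterrent(animal, severity):
--     if not animal:
--         return "None"
--     s = str(animal).lower().strip()
--     best = 6
--     for i in range(len(s)):
--         for kw, p in _KEYWORDS.items():
--             if p < best and s.startswith(kw, i):
--                 best = p
--     if best < 6:
--         return _RESPONSES[best]
--     if severity == 'high':
--         return "Siren & Flashlight"
--     if severity == 'medium':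
--         return "Ultrasonic Sound"
--     return "None"
-- ===== Notes on version B (the rewrite author's own statement) =====
-- stated objective: alternative
-- what changed: B replaces A's ordered per-keyword containment chain by a single left-to-right scan of the animal string that, at each position, looks up keywords starting there in a keyword->priority dict and keeps the minimum priority, then maps that priority to the response.
import Mathlib
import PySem

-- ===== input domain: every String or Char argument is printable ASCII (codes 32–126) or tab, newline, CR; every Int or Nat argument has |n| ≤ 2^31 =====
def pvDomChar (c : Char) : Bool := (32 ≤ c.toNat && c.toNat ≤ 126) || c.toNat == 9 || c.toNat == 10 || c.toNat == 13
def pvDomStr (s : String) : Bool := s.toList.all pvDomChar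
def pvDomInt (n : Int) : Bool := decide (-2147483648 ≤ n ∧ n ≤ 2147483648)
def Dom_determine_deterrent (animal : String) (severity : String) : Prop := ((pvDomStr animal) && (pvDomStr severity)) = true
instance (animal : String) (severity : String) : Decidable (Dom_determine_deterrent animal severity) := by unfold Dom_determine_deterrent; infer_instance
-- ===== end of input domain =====

-- B replaces A's ordered per-keyword containment chain by one positional scan of the
-- string keeping the minimum keyword priority (objective: alternative; same cost class).

-- ===== PORT A =====
def determine_deterrent (animal : String) (severity : String) : String :=
  if animal == "" then "None"
  else
    let animal_lower := PySem.Str.strip (PySem.Str.lower animal)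
    if PySem.Str.isIn "elephant" animal_lower then "Bee Sound & Flashlight Strobe"
    else if (["bear", "lion", "tiger", "wolf", "panther", "leopard"].any
        (fun predator => PySem.Str.isIn predator animal_lower)) then "High-Intensity Siren & Flashlight"
    else if (["boar", "deer", "moose", "buffalo", "rhino", "zebra"].any
        (fun mid_threat => PySem.Str.isIn mid_threat animal_lower)) then "Ultrasonic Sound & Flashlight"
    else if (["dog", "fox", "coyote", "cat", "raccoon", "possum", "skunk"].any
        (fun small_threat => PySem.Str.isIn small_threat animal_lower)) then "Ultrasonic Sound"
    else if (["bird", "pigeon", "crow", "owl", "hawk", "eagle"].any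
        (fun bird => PySem.Str.isIn bird animal_lower)) then "High-Pitch Ultrasonic"
    else if PySem.Str.isIn "human" animal_lower || PySem.Str.isIn "person" animal_lower then "None"
    else if severity == "high" then "Siren & Flashlight"
    else if severity == "medium" then "Ultrasonic Sound"
    else "None"

-- ===== PORT B =====
-- the _KEYWORDS dict of Source B, in insertion order (keyword -> priority)
def pvKW : List (List Char × Nat) :=
  [ ("elephant".toList, 0),
    ("bear".toList, 1), ("lion".toList, 1), ("tiger".toList, 1), ("wolf".toList, 1),
    ("panther".toList, 1), ("leopard".toList, 1),
    ("boar".toList, 2), ("deer".toList, 2), ("moose".toList, 2), ("buffalo".toList, 2),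
    ("rhino".toList, 2), ("zebra".toList, 2),
    ("dog".toList, 3), ("fox".toList, 3), ("coyote".toList, 3), ("cat".toList, 3),
    ("raccoon".toList, 3), ("possum".toList, 3), ("skunk".toList, 3),
    ("bird".toList, 4), ("pigeon".toList, 4), ("crow".toList, 4), ("owl".toList, 4),
    ("hawk".toList, 4), ("eagle".toList, 4),
    ("human".toList, 5), ("person".toList, 5) ]

def pvResponses : List String :=
  [ "Bee Sound & Flashlight Strobe", "High-Intensity Siren & Flashlight",
    "Ultrasonic Sound & Flashlight", "Ultrasonic Sound",
    "High-Pitch Ultrasonic", "None" ]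

def determine_deterrent_alt (animal : String) (severity : String) : String :=
  if animal == "" then "None"
  else
    let s := PySem.Chars.strip (PySem.Chars.lower animal.toList)
    -- for i in range(len(s)): for kw, p in _KEYWORDS.items(): if p < best and s.startswith(kw, i)
    -- s.startswith(kw, i) with 0 ≤ i is exactly Chars.startswith (s.drop i.toNat) kw
    let best : Nat := (PySem.List.pyRange 0 s.length 1).foldl
      (fun best i => pvKW.foldl
        (fun best kp =>
          if kp.2 < best && PySem.Chars.startswith (s.drop i.toNat) kp.1 then kp.2 else best)
        best) 6
    if best < 6 then PySem.List.pyGetD pvResponses (best : Int) "None"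
    else if severity == "high" then "Siren & Flashlight"
    else if severity == "medium" then "Ultrasonic Sound"
    else "None"

-- ===== PRECONDITION & SPEC =====
def Spec_determine_deterrent (animal : String) (severity : String) (out : String) : Prop := out = determine_deterrent_alt animal severity
instance (animal : String) (severity : String) (out : String) : Decidable (Spec_determine_deterrent animal severity out) := by unfold Spec_determine_deterrent; infer_instance

-- ===== CLAIM (what is proved, stated in full; the proofs are below) =====
def Claim_equal_determine_deterrent : Prop := ∀ (animal : String) (severity : String), Dom_determine_deterrent animal severity → Spec_determine_deterrent animal severity (determine_deterrent animal severity)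

-- ===== LEMMAS AND PROOFS =====

-- keyword filter-fold of Source B's inner loop is a fold of `min` over the matched priorities
lemma pv_fold_filter {a : Type} (c : a -> Bool) (f : a -> Nat) :
    forall (l : List a) (init : Nat),
      l.foldl (fun acc x => if f x < acc && c x then f x else acc) init
        = ((l.filter c).map f).foldl min init := by
  intro l
  induction l with
  | nil => intro init; rfl
  | cons x t ih =>
    intro init
    by_cases hc : c x
    · simp only [List.foldl_cons, List.filter_cons, hc, if_pos, List.map_cons, Bool.and_true]
      rw [ih]
      congr 1
      rcases Nat.lt_or_ge (f x) init with h | h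
      · simp [h, min_eq_right (le_of_lt h)]
      · simp [Nat.not_lt.2 h, min_eq_left h]
    · simp only [List.foldl_cons, List.filter_cons, hc, Bool.and_false, if_neg, Bool.false_eq_true,
        not_false_eq_true]
      exact ih init

lemma pv_foldl_min_le_init (l : List Nat) (a : Nat) : l.foldl min a ≤ a := by
  induction l generalizing a with
  | nil => exact le_refl a
  | cons x t ih => exact le_trans (ih (min a x)) (min_le_left a x)

lemma pv_foldl_min_le_mem {l : List Nat} {x : Nat} (h : x ∈ l) (a : Nat) : l.foldl min a ≤ x := by
  induction l generalizing a with
  | nil => cases h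
  | cons y t ih =>
    rcases List.mem_cons.1 h with rfl | hm
    · exact le_trans (pv_foldl_min_le_init t (min a x)) (min_le_right a x)
    · exact ih hm (min a y)

lemma pv_foldl_min_eq_or_mem (l : List Nat) (a : Nat) : l.foldl min a = a ∨ l.foldl min a ∈ l := by
  induction l generalizing a with
  | nil => exact Or.inl rfl
  | cons x t ih =>
    rcases ih (min a x) with h | h
    · rcases Nat.le_total a x with hax | hxa
      · exact Or.inl (by rw [List.foldl_cons, h, min_eq_left hax])
      · exact Or.inr (by rw [List.foldl_cons, h, min_eq_right hxa]; exact List.mem_cons_self ..)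
    · exact Or.inr (List.mem_cons_of_mem x h)

-- the multiset of priorities of all (position, keyword) matches Source B's double loop visits
def pvCands (s : List Char) : List Nat :=
  (PySem.List.pyRange 0 s.length 1).flatMap
    (fun i => ((pvKW.filter (fun kp => PySem.Chars.startswith (List.drop i.toNat s) kp.1)).map
      (fun kp => kp.2)))

lemma pv_kw_ne : ∀ kp ∈ pvKW, kp.1 ≠ [] := by decide

lemma pv_sw_iff (s kw : List Char) (hne : kw ≠ []) :
    (∃ i ∈ PySem.List.pyRange 0 (s.length : Int) 1,
        PySem.Chars.startswith (List.drop i.toNat s) kw = true)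
      ↔ PySem.Chars.isIn kw s = true := by
  rw [← PySem.Chars.exists_prefix_drop_iff_isIn]
  constructor
  · rintro ⟨i, _, hsw⟩
    exact ⟨i.toNat, (PySem.Chars.startswith_iff _ _).1 hsw⟩
  · rintro ⟨j, hpre⟩
    have hj : j < s.length := by
      by_contra hge
      rw [List.drop_eq_nil_of_le (Nat.le_of_not_lt hge)] at hpre
      exact hne (List.prefix_nil.1 hpre)
    refine ⟨(j : Int), ?_, ?_⟩
    · rw [PySem.List.mem_pyRange_one]
      exact ⟨Int.natCast_nonneg j, by exact_mod_cast hj⟩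
    · rw [Int.toNat_natCast]
      exact (PySem.Chars.startswith_iff _ _).2 hpre

lemma pv_mem_cands (s : List Char) (p : Nat) :
    p ∈ pvCands s ↔ ∃ kp ∈ pvKW, kp.2 = p ∧ PySem.Chars.isIn kp.1 s = true := by
  simp only [pvCands, List.mem_flatMap, List.mem_map, List.mem_filter]
  constructor
  · rintro ⟨i, hi, kp, ⟨hmem, hsw⟩, hp⟩
    exact ⟨kp, hmem, hp, (pv_sw_iff s kp.1 (pv_kw_ne kp hmem)).1 ⟨i, hi, hsw⟩⟩
  · rintro ⟨kp, hmem, hp, hin⟩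
    obtain ⟨i, hi, hsw⟩ := (pv_sw_iff s kp.1 (pv_kw_ne kp hmem)).2 hin
    exact ⟨i, hi, kp, ⟨hmem, hsw⟩, hp⟩

-- Source B's double loop equals a fold of min over pvCands
lemma pv_best_aux (s : List Char) :
    ∀ (l : List Int) (a : Nat),
      l.foldl (fun best i => pvKW.foldl
        (fun best kp =>
          if kp.2 < best && PySem.Chars.startswith (List.drop i.toNat s) kp.1 then kp.2 else best)
        best) a
      = (l.flatMap (fun i => ((pvKW.filter
          (fun kp => PySem.Chars.startswith (List.drop i.toNat s) kp.1)).map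
            (fun kp => kp.2)))).foldl min a := by
  intro l
  induction l with
  | nil => intro a; rfl
  | cons x t ih =>
    intro a
    simp only [List.foldl_cons, List.flatMap_cons, List.foldl_append]
    rw [pv_fold_filter]
    exact ih _

-- Source B's double loop equals a fold of min over pvCands
lemma pv_best_eq (s : List Char) :
    (PySem.List.pyRange 0 (s.length : Int) 1).foldl
      (fun best i => pvKW.foldl
        (fun best kp =>
          if kp.2 < best && PySem.Chars.startswith (List.drop i.toNat s) kp.1 then kp.2 else best)
        best) 6
    = (pvCands s).foldl min 6 :=
  pv_best_aux s (PySem.List.pyRange 0 (s.length : Int) 1) 6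

-- matched priorities, sorted into A's six branch conditions
lemma pv_grp_iff (s : List Char) (p : Nat) :
    (∃ kp ∈ pvKW, kp.2 = p ∧ PySem.Chars.isIn kp.1 s = true) ↔
      (p = 0 ∧ PySem.Chars.isIn "elephant".toList s = true) ∨
      (p = 1 ∧ (["bear", "lion", "tiger", "wolf", "panther", "leopard"].any
        (fun w => PySem.Chars.isIn w.toList s)) = true) ∨
      (p = 2 ∧ (["boar", "deer", "moose", "buffalo", "rhino", "zebra"].any
        (fun w => PySem.Chars.isIn w.toList s)) = true) ∨
      (p = 3 ∧ (["dog", "fox", "coyote", "cat", "raccoon", "possum", "skunk"].any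
        (fun w => PySem.Chars.isIn w.toList s)) = true) ∨
      (p = 4 ∧ (["bird", "pigeon", "crow", "owl", "hawk", "eagle"].any
        (fun w => PySem.Chars.isIn w.toList s)) = true) ∨
      (p = 5 ∧ (PySem.Chars.isIn "human".toList s || PySem.Chars.isIn "person".toList s) = true) := by
  simp only [pvKW, List.mem_cons, List.not_mem_nil, or_false, List.any_eq_true, Bool.or_eq_true]
  constructor
  · rintro ⟨kp, hmem, rfl, hin⟩
    rcases hmem with rfl|rfl|rfl|rfl|rfl|rfl|rfl|rfl|rfl|rfl|rfl|rfl|rfl|rfl|rfl|rfl|rfl|rfl|rfl|rfl|rfl|rfl|rfl|rfl|rfl|rfl|rfl|rfl <;>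
      simp_all
  · rintro (⟨rfl, h⟩|⟨rfl, h⟩|⟨rfl, h⟩|⟨rfl, h⟩|⟨rfl, h⟩|⟨rfl, h⟩)
    · exact ⟨("elephant".toList, 0), by exact (Or.inl rfl), rfl, h⟩
    · obtain ⟨w, hw, h⟩ := h
      rcases hw with rfl|rfl|rfl|rfl|rfl|rfl
      · exact ⟨("bear".toList, 1), by exact Or.inr (Or.inl rfl), rfl, h⟩
      · exact ⟨("lion".toList, 1), by exact Or.inr (Or.inr (Or.inl rfl)), rfl, h⟩
      · exact ⟨("tiger".toList, 1), by exact Or.inr (Or.inr (Or.inr (Or.inl rfl))), rfl, h⟩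
      · exact ⟨("wolf".toList, 1), by exact Or.inr (Or.inr (Or.inr (Or.inr (Or.inl rfl)))), rfl, h⟩
      · exact ⟨("panther".toList, 1), by exact Or.inr (Or.inr (Or.inr (Or.inr (Or.inr (Or.inl rfl))))), rfl, h⟩
      · exact ⟨("leopard".toList, 1), by exact Or.inr (Or.inr (Or.inr (Or.inr (Or.inr (Or.inr (Or.inl rfl)))))), rfl, h⟩
    · obtain ⟨w, hw, h⟩ := h
      rcases hw with rfl|rfl|rfl|rfl|rfl|rfl
      · exact ⟨("boar".toList, 2), by exact Or.inr (Or.inr (Or.inr (Or.inr (Or.inr (Or.inr (Or.inr (Or.inl rfl))))))), rfl, h⟩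
      · exact ⟨("deer".toList, 2), by exact Or.inr (Or.inr (Or.inr (Or.inr (Or.inr (Or.inr (Or.inr (Or.inr (Or.inl rfl)))))))), rfl, h⟩
      · exact ⟨("moose".toList, 2), by exact Or.inr (Or.inr (Or.inr (Or.inr (Or.inr (Or.inr (Or.inr (Or.inr (Or.inr (Or.inl rfl))))))))), rfl, h⟩
      · exact ⟨("buffalo".toList, 2), by exact Or.inr (Or.inr (Or.inr (Or.inr (Or.inr (Or.inr (Or.inr (Or.inr (Or.inr (Or.inr (Or.inl rfl)))))))))), rfl, h⟩
      · exact ⟨("rhino".toList, 2), by exact Or.inr (Or.inr (Or.inr (Or.inr (Or.inr (Or.inr (Or.inr (Or.inr (Or.inr (Or.inr (Or.inr (Or.inl rfl))))))))))), rfl, h⟩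
      · exact ⟨("zebra".toList, 2), by exact Or.inr (Or.inr (Or.inr (Or.inr (Or.inr (Or.inr (Or.inr (Or.inr (Or.inr (Or.inr (Or.inr (Or.inr (Or.inl rfl)))))))))))), rfl, h⟩
    · obtain ⟨w, hw, h⟩ := h
      rcases hw with rfl|rfl|rfl|rfl|rfl|rfl|rfl
      · exact ⟨("dog".toList, 3), by exact Or.inr (Or.inr (Or.inr (Or.inr (Or.inr (Or.inr (Or.inr (Or.inr (Or.inr (Or.inr (Or.inr (Or.inr (Or.inr (Or.inl rfl))))))))))))), rfl, h⟩
      · exact ⟨("fox".toList, 3), by exact Or.inr (Or.inr (Or.inr (Or.inr (Or.inr (Or.inr (Or.inr (Or.inr (Or.inr (Or.inr (Or.inr (Or.inr (Or.inr (Or.inr (Or.inl rfl)))))))))))))), rfl, h⟩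
      · exact ⟨("coyote".toList, 3), by exact Or.inr (Or.inr (Or.inr (Or.inr (Or.inr (Or.inr (Or.inr (Or.inr (Or.inr (Or.inr (Or.inr (Or.inr (Or.inr (Or.inr (Or.inr (Or.inl rfl))))))))))))))), rfl, h⟩
      · exact ⟨("cat".toList, 3), by exact Or.inr (Or.inr (Or.inr (Or.inr (Or.inr (Or.inr (Or.inr (Or.inr (Or.inr (Or.inr (Or.inr (Or.inr (Or.inr (Or.inr (Or.inr (Or.inr (Or.inl rfl)))))))))))))))), rfl, h⟩
      · exact ⟨("raccoon".toList, 3), by exact Or.inr (Or.inr (Or.inr (Or.inr (Or.inr (Or.inr (Or.inr (Or.inr (Or.inr (Or.inr (Or.inr (Or.inr (Or.inr (Or.inr (Or.inr (Or.inr (Or.inr (Or.inl rfl))))))))))))))))), rfl, h⟩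
      · exact ⟨("possum".toList, 3), by exact Or.inr (Or.inr (Or.inr (Or.inr (Or.inr (Or.inr (Or.inr (Or.inr (Or.inr (Or.inr (Or.inr (Or.inr (Or.inr (Or.inr (Or.inr (Or.inr (Or.inr (Or.inr (Or.inl rfl)))))))))))))))))), rfl, h⟩
      · exact ⟨("skunk".toList, 3), by exact Or.inr (Or.inr (Or.inr (Or.inr (Or.inr (Or.inr (Or.inr (Or.inr (Or.inr (Or.inr (Or.inr (Or.inr (Or.inr (Or.inr (Or.inr (Or.inr (Or.inr (Or.inr (Or.inr (Or.inl rfl))))))))))))))))))), rfl, h⟩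
    · obtain ⟨w, hw, h⟩ := h
      rcases hw with rfl|rfl|rfl|rfl|rfl|rfl
      · exact ⟨("bird".toList, 4), by exact Or.inr (Or.inr (Or.inr (Or.inr (Or.inr (Or.inr (Or.inr (Or.inr (Or.inr (Or.inr (Or.inr (Or.inr (Or.inr (Or.inr (Or.inr (Or.inr (Or.inr (Or.inr (Or.inr (Or.inr (Or.inl rfl)))))))))))))))))))), rfl, h⟩
      · exact ⟨("pigeon".toList, 4), by exact Or.inr (Or.inr (Or.inr (Or.inr (Or.inr (Or.inr (Or.inr (Or.inr (Or.inr (Or.inr (Or.inr (Or.inr (Or.inr (Or.inr (Or.inr (Or.inr (Or.inr (Or.inr (Or.inr (Or.inr (Or.inr (Or.inl rfl))))))))))))))))))))), rfl, h⟩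
      · exact ⟨("crow".toList, 4), by exact Or.inr (Or.inr (Or.inr (Or.inr (Or.inr (Or.inr (Or.inr (Or.inr (Or.inr (Or.inr (Or.inr (Or.inr (Or.inr (Or.inr (Or.inr (Or.inr (Or.inr (Or.inr (Or.inr (Or.inr (Or.inr (Or.inr (Or.inl rfl)))))))))))))))))))))), rfl, h⟩
      · exact ⟨("owl".toList, 4), by exact Or.inr (Or.inr (Or.inr (Or.inr (Or.inr (Or.inr (Or.inr (Or.inr (Or.inr (Or.inr (Or.inr (Or.inr (Or.inr (Or.inr (Or.inr (Or.inr (Or.inr (Or.inr (Or.inr (Or.inr (Or.inr (Or.inr (Or.inr (Or.inl rfl))))))))))))))))))))))), rfl, h⟩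
      · exact ⟨("hawk".toList, 4), by exact Or.inr (Or.inr (Or.inr (Or.inr (Or.inr (Or.inr (Or.inr (Or.inr (Or.inr (Or.inr (Or.inr (Or.inr (Or.inr (Or.inr (Or.inr (Or.inr (Or.inr (Or.inr (Or.inr (Or.inr (Or.inr (Or.inr (Or.inr (Or.inr (Or.inl rfl)))))))))))))))))))))))), rfl, h⟩
      · exact ⟨("eagle".toList, 4), by exact Or.inr (Or.inr (Or.inr (Or.inr (Or.inr (Or.inr (Or.inr (Or.inr (Or.inr (Or.inr (Or.inr (Or.inr (Or.inr (Or.inr (Or.inr (Or.inr (Or.inr (Or.inr (Or.inr (Or.inr (Or.inr (Or.inr (Or.inr (Or.inr (Or.inr (Or.inl rfl))))))))))))))))))))))))), rfl, h⟩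
    · rcases h with h|h
      · exact ⟨("human".toList, 5), by exact Or.inr (Or.inr (Or.inr (Or.inr (Or.inr (Or.inr (Or.inr (Or.inr (Or.inr (Or.inr (Or.inr (Or.inr (Or.inr (Or.inr (Or.inr (Or.inr (Or.inr (Or.inr (Or.inr (Or.inr (Or.inr (Or.inr (Or.inr (Or.inr (Or.inr (Or.inr (Or.inl rfl)))))))))))))))))))))))))), rfl, h⟩
      · exact ⟨("person".toList, 5), by exact Or.inr (Or.inr (Or.inr (Or.inr (Or.inr (Or.inr (Or.inr (Or.inr (Or.inr (Or.inr (Or.inr (Or.inr (Or.inr (Or.inr (Or.inr (Or.inr (Or.inr (Or.inr (Or.inr (Or.inr (Or.inr (Or.inr (Or.inr (Or.inr (Or.inr (Or.inr (Or.inr (rfl))))))))))))))))))))))))))), rfl, h⟩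

-- ===== VERDICT (by name: the statement is the Claim_ definition above) =====
theorem determine_deterrent_spec : Claim_equal_determine_deterrent := by
  intro animal severity _
  unfold Spec_determine_deterrent determine_deterrent determine_deterrent_alt
  by_cases h0 : animal == ""
  · simp [h0]
  · simp only [h0, Bool.false_eq_true, if_false, PySem.Str.isIn_eq, PySem.Str.toList_strip,
      PySem.Str.toList_lower]
    generalize PySem.Chars.strip (PySem.Chars.lower animal.toList) = s
    rw [pv_best_eq s]
    have hub := pv_foldl_min_eq_or_mem (pvCands s) 6
    have hmem : ∀ p, p ∈ pvCands s ↔ _ := fun p => (pv_mem_cands s p).trans (pv_grp_iff s p)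
    by_cases hp0 : PySem.Chars.isIn "elephant".toList s = true
    · -- branch 0 fires
      have hlek : (pvCands s).foldl min 6 ≤ 0 := pv_foldl_min_le_mem ((hmem 0).2 (Or.inl ⟨rfl, hp0⟩)) 6
      have hmk : (pvCands s).foldl min 6 = 0 := by
        rcases hub with h6 | hmm
        · omega
        · rcases (hmem _).1 hmm with ⟨he, hc⟩|⟨he, hc⟩|⟨he, hc⟩|⟨he, hc⟩|⟨he, hc⟩|⟨he, hc⟩
          · omega
          · omega
          · omega
          · omega
          · omega
          · omega
      rw [hmk]
      clear hub hmem hlek hmk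
      simp_all [pvResponses]
      try decide
    · have hn0 : ¬ (PySem.Chars.isIn "elephant".toList s = true) := hp0
      by_cases hp1 : (["bear", "lion", "tiger", "wolf", "panther", "leopard"].any (fun w => PySem.Chars.isIn w.toList s)) = true
      · -- branch 1 fires
        have hlek : (pvCands s).foldl min 6 ≤ 1 := pv_foldl_min_le_mem ((hmem 1).2 (Or.inr (Or.inl ⟨rfl, hp1⟩))) 6
        have hmk : (pvCands s).foldl min 6 = 1 := by
          rcases hub with h6 | hmm
          · omega
          · rcases (hmem _).1 hmm with ⟨he, hc⟩|⟨he, hc⟩|⟨he, hc⟩|⟨he, hc⟩|⟨he, hc⟩|⟨he, hc⟩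
            · exact absurd hc hn0
            · omega
            · omega
            · omega
            · omega
            · omega
        rw [hmk]
        clear hub hmem hlek hmk
        simp_all [pvResponses]
        try decide
      · have hn1 : ¬ ((["bear", "lion", "tiger", "wolf", "panther", "leopard"].any (fun w => PySem.Chars.isIn w.toList s)) = true) := hp1
        by_cases hp2 : (["boar", "deer", "moose", "buffalo", "rhino", "zebra"].any (fun w => PySem.Chars.isIn w.toList s)) = true
        · -- branch 2 fires
          have hlek : (pvCands s).foldl min 6 ≤ 2 := pv_foldl_min_le_mem ((hmem 2).2 (Or.inr (Or.inr (Or.inl ⟨rfl, hp2⟩)))) 6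
          have hmk : (pvCands s).foldl min 6 = 2 := by
            rcases hub with h6 | hmm
            · omega
            · rcases (hmem _).1 hmm with ⟨he, hc⟩|⟨he, hc⟩|⟨he, hc⟩|⟨he, hc⟩|⟨he, hc⟩|⟨he, hc⟩
              · exact absurd hc hn0
              · exact absurd hc hn1
              · omega
              · omega
              · omega
              · omega
          rw [hmk]
          clear hub hmem hlek hmk
          simp_all [pvResponses]
          try decide
        · have hn2 : ¬ ((["boar", "deer", "moose", "buffalo", "rhino", "zebra"].any (fun w => PySem.Chars.isIn w.toList s)) = true) := hp2
          by_cases hp3 : (["dog", "fox", "coyote", "cat", "raccoon", "possum", "skunk"].any (fun w => PySem.Chars.isIn w.toList s)) = true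
          · -- branch 3 fires
            have hlek : (pvCands s).foldl min 6 ≤ 3 := pv_foldl_min_le_mem ((hmem 3).2 (Or.inr (Or.inr (Or.inr (Or.inl ⟨rfl, hp3⟩))))) 6
            have hmk : (pvCands s).foldl min 6 = 3 := by
              rcases hub with h6 | hmm
              · omega
              · rcases (hmem _).1 hmm with ⟨he, hc⟩|⟨he, hc⟩|⟨he, hc⟩|⟨he, hc⟩|⟨he, hc⟩|⟨he, hc⟩
                · exact absurd hc hn0
                · exact absurd hc hn1
                · exact absurd hc hn2
                · omega
                · omega
                · omega
            rw [hmk]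
            clear hub hmem hlek hmk
            simp_all [pvResponses]
            try decide
          · have hn3 : ¬ ((["dog", "fox", "coyote", "cat", "raccoon", "possum", "skunk"].any (fun w => PySem.Chars.isIn w.toList s)) = true) := hp3
            by_cases hp4 : (["bird", "pigeon", "crow", "owl", "hawk", "eagle"].any (fun w => PySem.Chars.isIn w.toList s)) = true
            · -- branch 4 fires
              have hlek : (pvCands s).foldl min 6 ≤ 4 := pv_foldl_min_le_mem ((hmem 4).2 (Or.inr (Or.inr (Or.inr (Or.inr (Or.inl ⟨rfl, hp4⟩)))))) 6
              have hmk : (pvCands s).foldl min 6 = 4 := by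
                rcases hub with h6 | hmm
                · omega
                · rcases (hmem _).1 hmm with ⟨he, hc⟩|⟨he, hc⟩|⟨he, hc⟩|⟨he, hc⟩|⟨he, hc⟩|⟨he, hc⟩
                  · exact absurd hc hn0
                  · exact absurd hc hn1
                  · exact absurd hc hn2
                  · exact absurd hc hn3
                  · omega
                  · omega
              rw [hmk]
              clear hub hmem hlek hmk
              simp_all [pvResponses]
              try decide
            · have hn4 : ¬ ((["bird", "pigeon", "crow", "owl", "hawk", "eagle"].any (fun w => PySem.Chars.isIn w.toList s)) = true) := hp4
              by_cases hp5 : (PySem.Chars.isIn "human".toList s || PySem.Chars.isIn "person".toList s) = true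
              · -- branch 5 fires
                have hlek : (pvCands s).foldl min 6 ≤ 5 := pv_foldl_min_le_mem ((hmem 5).2 (Or.inr (Or.inr (Or.inr (Or.inr (Or.inr (⟨rfl, hp5⟩))))))) 6
                have hmk : (pvCands s).foldl min 6 = 5 := by
                  rcases hub with h6 | hmm
                  · omega
                  · rcases (hmem _).1 hmm with ⟨he, hc⟩|⟨he, hc⟩|⟨he, hc⟩|⟨he, hc⟩|⟨he, hc⟩|⟨he, hc⟩
                    · exact absurd hc hn0
                    · exact absurd hc hn1
                    · exact absurd hc hn2
                    · exact absurd hc hn3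
                    · exact absurd hc hn4
                    · omega
                rw [hmk]
                clear hub hmem hlek hmk
                simp_all [pvResponses]
                try decide
              · have hn5 : ¬ ((PySem.Chars.isIn "human".toList s || PySem.Chars.isIn "person".toList s) = true) := hp5
                have hmk : (pvCands s).foldl min 6 = 6 := by
                  rcases hub with h6 | hmm
                  · exact h6
                  · rcases (hmem _).1 hmm with ⟨he, hc⟩|⟨he, hc⟩|⟨he, hc⟩|⟨he, hc⟩|⟨he, hc⟩|⟨he, hc⟩ <;>
                      [exact absurd hc hn0; exact absurd hc hn1; exact absurd hc hn2;
                       exact absurd hc hn3; exact absurd hc hn4; exact absurd hc hn5]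
                rw [hmk]
                clear hub hmem hmk
                simp_all
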